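-- pv_equiv track=rewrite | github.com/dvanael/pc-atividades | lista-09/g-flores-florecem.py | tautogram
-- ===== SOURCE A (Python) =====
-- def tautogram(phase: list) -> str:
--     letter = None
--     for i, word in enumerate(phase):
--         if i == 0:
--             letter = (word[0]).upper()
--         else:
--             if not (word[0].upper() == letter):
--                 return "N"
--     return "Y"
-- ===== SOURCE B (Python) =====
-- def tautogram(phase: list) -> str:
--     initials = {word[0].upper() for word in phase}
--     return "Y" if len(initials) <= 1 else "N"
-- ===== Notes on version B (the rewrite author's own statement) =====
-- stated objective: simpler
-- what changed: Replaces the ordered anchor-letter scan with early 'return N' by building the set of all uppercased initials in one collecting pass and answering from its cardinality (len <= 1).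
-- outside the precondition, e.g. on tautogram(['Ab', 'Cd', '']): A returns 'N', B raises IndexError
import Mathlib
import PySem

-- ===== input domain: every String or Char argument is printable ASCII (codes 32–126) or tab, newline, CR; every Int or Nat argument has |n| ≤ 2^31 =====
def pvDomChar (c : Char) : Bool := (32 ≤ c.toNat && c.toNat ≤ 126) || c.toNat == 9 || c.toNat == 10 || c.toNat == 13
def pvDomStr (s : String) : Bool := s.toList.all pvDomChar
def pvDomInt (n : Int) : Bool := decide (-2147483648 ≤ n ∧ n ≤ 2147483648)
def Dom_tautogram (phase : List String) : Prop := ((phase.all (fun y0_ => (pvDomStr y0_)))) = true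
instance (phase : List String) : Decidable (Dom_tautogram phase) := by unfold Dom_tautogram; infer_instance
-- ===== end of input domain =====

-- B replaces A's ordered anchor-letter scan with early exit by collecting the SET of all
-- uppercased initials and answering from its cardinality (objective: simpler); equal wherever
-- no word is empty (an empty word makes word[0] raise IndexError in B, and in A unless a
-- mismatch occurred earlier — Pre_ excludes those lists).

-- uppercased first letter of a word (' ' stands in for the IndexError case, which Pre_ rules out);
-- word[0] is a one-character string in Python, modelled exactly by its Char.
def pvInit (w : String) : Char := PySem.Chars.upperChar (((PySem.Str.pyGet? w 0)).getD ' ')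

-- ===== PORT A =====
def tautogramLoopA (i : Int) (letter : Option Char) : List String → String
  | [] => "Y"
  | word :: rest =>
    if i == 0 then
      tautogramLoopA (i + 1) (some (pvInit word)) rest
    else
      if ¬ (some (pvInit word) == letter) then "N"
      else tautogramLoopA (i + 1) letter rest

def tautogram (phase : List String) : String := tautogramLoopA 0 none phase

-- ===== PORT B =====
def tautogram_alt (phase : List String) : String :=
  let initials : PySem.Set Char := PySem.Set.ofList (phase.map pvInit)
  if initials.length ≤ 1 then "Y" else "N"

-- ===== PRECONDITION & SPEC =====
-- Pre_ excludes lists containing an empty word: there word[0] raises IndexError in B always,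
-- and in A too unless an earlier initial-letter mismatch already returned "N".
def Pre_tautogram (phase : List String) : Prop := ∀ w ∈ phase, w ≠ ""
instance (phase : List String) : Decidable (Pre_tautogram phase) := by unfold Pre_tautogram; infer_instance
def pvWitness_tautogram : List String := ["Ana", "amor"]

def Spec_tautogram (phase : List String) (out : String) : Prop := out = tautogram_alt phase
instance (phase : List String) (out : String) : Decidable (Spec_tautogram phase out) := by unfold Spec_tautogram; infer_instance

-- ===== CLAIM (what is proved, stated in full; the proofs are below) =====
def Claim_equal_tautogram : Prop := ∀ (phase : List String), Dom_tautogram phase → Pre_tautogram phase → Spec_tautogram phase (tautogram phase)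

-- ===== LEMMAS AND PROOFS =====

-- A's loop after the first word answers "Y" iff every remaining initial equals the anchor.
theorem tautogramLoopA_eq_all (L : Char) (rest : List String) (i : Int) (hi : 1 ≤ i) :
    tautogramLoopA i (some L) rest = (if rest.all (fun w => pvInit w == L) then "Y" else "N") := by
  induction rest generalizing i with
  | nil => simp [tautogramLoopA]
  | cons w t ih =>
    simp only [tautogramLoopA, List.all_cons]
    have hne : (i == 0) = false := by simp; omega
    rw [hne]
    simp only [Bool.false_eq_true, if_false]
    by_cases h : pvInit w = L
    · simp [h, ih (i + 1) (by omega)]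
    · simp [h]

-- set(x :: l) is a singleton exactly when every element of l equals x.
theorem ofList_cons_len_le_one (x : Char) (l : List Char) :
    ((PySem.Set.ofList (x :: l)).length ≤ 1) ↔ (∀ y ∈ l, y = x) := by
  have hnd : (PySem.Set.ofList (x :: l)).Nodup := PySem.Set.nodup_ofList _
  constructor
  · intro h y hy
    have hys : y ∈ PySem.Set.ofList (x :: l) := by
      rw [PySem.Set.mem_ofList]; exact List.mem_cons_of_mem _ hy
    have hxs : x ∈ PySem.Set.ofList (x :: l) := by
      rw [PySem.Set.mem_ofList]; exact List.mem_cons_self ..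
    cases hs : PySem.Set.ofList (x :: l) with
    | nil => rw [hs] at hxs; cases hxs
    | cons a t =>
      rw [hs] at h hys hxs
      have ht : t = [] := by
        cases t with
        | nil => rfl
        | cons b u => simp at h
      subst ht
      simp only [List.mem_singleton] at hys hxs
      rw [hys, hxs]
  · intro h
    have hsub : PySem.Set.ofList (x :: l) ⊆ [x] := by
      intro y hy
      rw [PySem.Set.mem_ofList] at hy
      rcases List.mem_cons.1 hy with h1 | h1
      · simp [h1]
      · simp [h y h1]
    calc (PySem.Set.ofList (x :: l)).length ≤ ([x] : List Char).length :=
          (hnd.subperm hsub).length_le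
      _ = 1 := rfl

theorem tautogram_eq (phase : List String) : tautogram phase = tautogram_alt phase := by
  cases phase with
  | nil => rfl
  | cons w0 t =>
    have h1 : (0 : Int) + 1 = 1 := by norm_num
    simp only [tautogram, tautogram_alt, tautogramLoopA, h1]
    rw [if_pos (by decide), tautogramLoopA_eq_all _ t 1 (by norm_num)]
    simp only [List.map_cons]
    by_cases hall : ∀ y ∈ t.map pvInit, y = pvInit w0
    · rw [if_pos ((ofList_cons_len_le_one _ _).2 hall), if_pos]
      simp only [List.all_eq_true, beq_iff_eq]
      intro w hw
      exact hall (pvInit w) (List.mem_map_of_mem hw)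
    · rw [if_neg (fun h => hall ((ofList_cons_len_le_one _ _).1 h)), if_neg]
      simp only [List.all_eq_true, beq_iff_eq]
      intro h
      apply hall
      intro y hy
      obtain ⟨w, hw, rfl⟩ := List.mem_map.1 hy
      exact h w hw

-- ===== VERDICT (by name: the statement is the Claim_ definition above) =====
theorem tautogram_spec : Claim_equal_tautogram := by
  intro phase _ _
  unfold Spec_tautogram
  exact tautogram_eq phase
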